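-- pv_equiv track=rewrite | github.com/K-Dongyoung/algo | programmers/짝지어 제거하기.py | solution
-- ===== SOURCE A (Python) =====
-- def solution(s):
--     stack = []
--     i = -1
--     for c in s:
--         if stack and stack[i] == c:
--             stack.pop()
--             i -= 1
--             continue
--         stack.append(c)
--         i += 1
--     return 1 if not stack else 0
-- ===== SOURCE B (Python) =====
-- def solution(s):
--     t = list(s)
--     changed = True
--     while changed:
--         out = []
--         changed = False
--         i = 0
--         n = len(t)
--         while i < n:
--             if i + 1 < n and t[i] == t[i + 1]:
--                 i += 2
--                 changed = True
--             else:
--                 out.append(t[i])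
--                 i += 1
--         t = out
--     return 1 if not t else 0
-- ===== Notes on version B (the rewrite author's own statement) =====
-- stated objective: alternative
-- what changed: Replaces the one-pass stack with repeated whole-string passes that each delete every adjacent equal pair, iterated to a fixpoint; correctness rests on confluence of pair removal.
import Mathlib
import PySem

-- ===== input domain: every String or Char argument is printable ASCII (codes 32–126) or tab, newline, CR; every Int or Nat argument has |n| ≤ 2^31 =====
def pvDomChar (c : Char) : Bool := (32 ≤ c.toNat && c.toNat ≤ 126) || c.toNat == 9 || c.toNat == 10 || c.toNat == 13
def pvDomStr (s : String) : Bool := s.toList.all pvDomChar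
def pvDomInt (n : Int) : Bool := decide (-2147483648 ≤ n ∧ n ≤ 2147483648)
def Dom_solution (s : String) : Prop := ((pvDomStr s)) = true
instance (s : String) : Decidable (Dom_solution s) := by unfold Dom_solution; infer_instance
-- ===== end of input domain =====

-- B is an alternative algorithm (repeated full-pass pair deletion to a fixpoint) proved to
-- return the same value as A's one-pass stack; neither is claimed faster.

-- ===== PORT A =====
-- one step of A's loop body: state = (stack, i)
def solAStep (st : List Char × Int) (c : Char) : List Char × Int :=
  if st.1 ≠ [] ∧ PySem.List.pyGet? st.1 st.2 = some c then (st.1.dropLast, st.2 - 1)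
  else (st.1 ++ [c], st.2 + 1)

def solution (s : String) : Int :=
  let r := s.toList.foldl solAStep (([] : List Char), (-1 : Int))
  if r.1 = [] then 1 else 0

-- ===== PORT B =====
-- one whole-string pass of B's inner while-loop: returns (out, changed)
def onePassP : List Char → List Char × Bool
  | [] => ([], false)
  | [c] => ([c], false)
  | a :: b :: t =>
    if a = b then ((onePassP t).1, true)
    else (a :: (onePassP (b :: t)).1, (onePassP (b :: t)).2)

theorem onePassP_le : ∀ t : List Char, (onePassP t).1.length ≤ t.length := by
  intro t
  induction t using onePassP.induct with
  | case1 => simp [onePassP]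
  | case2 c => simp [onePassP]
  | case3 b t ih => simp only [onePassP]; simp; omega
  | case4 a b t h ih => simp only [onePassP, if_neg h] at *; simp at *; omega

theorem onePassP_true_lt : ∀ t : List Char, (onePassP t).2 = true → (onePassP t).1.length < t.length := by
  intro t
  induction t using onePassP.induct with
  | case1 => simp [onePassP]
  | case2 c => simp [onePassP]
  | case3 b t ih =>
      intro _
      have := onePassP_le t
      simp only [onePassP]
      simp; omega
  | case4 a b t h ih =>
      simp only [onePassP, if_neg h] at *
      intro hch
      have := ih hch
      simp at *; omega

-- B's outer while-loop
def collapse (t : List Char) : List Char :=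
  if h : (onePassP t).2 = true then collapse (onePassP t).1 else t
termination_by t.length
decreasing_by exact onePassP_true_lt t h

def solution_alt (s : String) : Int :=
  if collapse s.toList = [] then 1 else 0

-- ===== PRECONDITION & SPEC =====
def Spec_solution (s : String) (out : Int) : Prop := out = solution_alt s
instance (s : String) (out : Int) : Decidable (Spec_solution s out) := by unfold Spec_solution; infer_instance

-- ===== CLAIM (what is proved, stated in full; the proofs are below) =====
def Claim_equal_solution : Prop := ∀ (s : String), Dom_solution s → Spec_solution s (solution s)

-- ===== LEMMAS AND PROOFS =====

-- the simple stack step (A's step with the redundant index dropped)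
def step (st : List Char) (c : Char) : List Char :=
  if st.getLast? = some c then st.dropLast else st ++ [c]

-- "no two adjacent equal characters"
def Irr (st : List Char) : Prop := List.IsChain (· ≠ ·) st

theorem pyGet_last (st : List Char) (h : st ≠ []) :
    PySem.List.pyGet? st ((st.length : Int) - 1) = st.getLast? := by
  have hlen : 1 ≤ st.length := List.length_pos_iff.mpr h
  rw [PySem.List.pyGet?_of_nonneg st (by omega)]
  have : ((st.length : Int) - 1).toNat = st.length - 1 := by omega
  rw [this, List.getLast?_eq_getElem?]

theorem stepA_eq (st : List Char) (c : Char) :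
    solAStep (st, (st.length : Int) - 1) c = (step st c, ((step st c).length : Int) - 1) := by
  rcases eq_or_ne st [] with rfl | h
  · simp [solAStep, step, PySem.List.pyGet?]
  · have hlen : 1 ≤ st.length := List.length_pos_iff.mpr h
    simp only [solAStep, step, pyGet_last st h]
    by_cases hg : st.getLast? = some c
    · simp only [if_pos hg, ne_eq, h, not_false_eq_true, true_and]
      have : st.dropLast.length = st.length - 1 := by simp
      simp only [this]; congr 1; omega
    · simp [hg, h]

theorem foldA_eq : ∀ (l : List Char) (st : List Char),
    List.foldl solAStep (st, (st.length : Int) - 1) l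
      = (List.foldl step st l, ((List.foldl step st l).length : Int) - 1) := by
  intro l
  induction l with
  | nil => intro st; rfl
  | cons c t ih => intro st; simp only [List.foldl_cons, stepA_eq, ih]

theorem irr_step (st : List Char) (c : Char) (h : Irr st) : Irr (step st c) := by
  unfold step
  by_cases hg : st.getLast? = some c
  · rw [if_pos hg]
    rcases eq_or_ne st [] with rfl | hne
    · simpa using h
    · have hd := List.dropLast_append_getLast hne
      unfold Irr at *
      rw [← hd] at h
      exact (List.isChain_append.mp h).1
  · rw [if_neg hg]
    unfold Irr at *
    rw [List.isChain_append]
    refine ⟨h, List.isChain_singleton _, ?_⟩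
    intro x hx y hy
    simp at hy; subst hy
    intro hxy; subst hxy
    exact hg hx

theorem doubleStep (st : List Char) (c : Char) (h : Irr st) :
    step (step st c) c = st := by
  by_cases hg : st.getLast? = some c
  · have hne : st ≠ [] := by intro h0; subst h0; simp at hg
    have hd := List.dropLast_append_getLast hne
    have hgl : st.getLast hne = c := by
      have := List.getLast?_eq_some_getLast hne
      rw [hg] at this; exact (Option.some.inj this).symm
    have hdc : st.dropLast ++ [c] = st := by rw [← hgl]; exact hd
    have hlast2 : st.dropLast.getLast? ≠ some c := by
      unfold Irr at h
      rw [← hdc] at h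
      have := (List.isChain_append.mp h).2.2
      intro hh
      exact this c hh c (by simp) rfl
    unfold step
    rw [if_pos hg, if_neg hlast2, hdc]
  · unfold step
    rw [if_neg hg]
    have h1 : (st ++ [c]).getLast? = some c := by simp
    rw [if_pos h1, List.dropLast_concat]

theorem irr_nil : Irr [] := List.isChain_nil

theorem pass_eq : ∀ (t : List Char), ∀ (st : List Char), Irr st →
    List.foldl step st (onePassP t).1 = List.foldl step st t := by
  intro t
  induction t using onePassP.induct with
  | case1 => intro st _; rfl
  | case2 c => intro st _; rfl
  | case3 b t ih =>
      intro st hst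
      have : (onePassP (b :: b :: t)).1 = (onePassP t).1 := by simp [onePassP]
      rw [this, ih st hst]
      simp only [List.foldl_cons]
      rw [doubleStep st b hst]
  | case4 a b t h ih =>
      intro st hst
      have : (onePassP (a :: b :: t)).1 = a :: (onePassP (b :: t)).1 := by
        simp [onePassP, h]
      rw [this]
      simp only [List.foldl_cons]
      exact ih (step st a) (irr_step st a hst)

theorem onePassP_false_irr : ∀ t : List Char, (onePassP t).2 = false → Irr t := by
  intro t
  induction t using onePassP.induct with
  | case1 => intro _; exact irr_nil
  | case2 c => intro _; exact List.isChain_singleton c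
  | case3 b t ih => intro hf; simp [onePassP] at hf
  | case4 a b t h ih =>
      intro hf
      have h2 : (onePassP (b :: t)).2 = false := by
        simpa [onePassP, h] using hf
      exact List.isChain_cons_cons.mpr ⟨h, ih h2⟩

theorem irr_foldl_id : ∀ (t st : List Char), Irr (st ++ t) →
    List.foldl step st t = st ++ t := by
  intro t
  induction t with
  | nil => intro st _; simp
  | cons c t' ih =>
      intro st hirr
      have hg : st.getLast? ≠ some c := by
        unfold Irr at hirr
        have := (List.isChain_append.mp hirr).2.2
        intro hh
        exact this c hh c (by simp) rfl
      have hstep : step st c = st ++ [c] := by unfold step; rw [if_neg hg]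
      simp only [List.foldl_cons, hstep]
      have : Irr ((st ++ [c]) ++ t') := by
        rw [List.append_assoc]; simpa using hirr
      rw [ih (st ++ [c]) this, List.append_assoc]; simp

theorem collapse_foldl : ∀ t : List Char,
    List.foldl step [] (collapse t) = List.foldl step [] t := by
  intro t
  induction t using collapse.induct with
  | case1 t h ih =>
      rw [collapse, dif_pos h, ih, pass_eq t [] irr_nil]
  | case2 t h =>
      rw [collapse, dif_neg h]

theorem collapse_irr : ∀ t : List Char, Irr (collapse t) := by
  intro t
  induction t using collapse.induct with
  | case1 t h ih => rw [collapse, dif_pos h]; exact ih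
  | case2 t h =>
      rw [collapse, dif_neg h]
      exact onePassP_false_irr t (by simpa using h)

theorem collapse_eq_stack (t : List Char) :
    collapse t = List.foldl step [] t := by
  have h1 : List.foldl step [] (collapse t) = collapse t := by
    have := irr_foldl_id (collapse t) [] (by simpa using collapse_irr t)
    simpa using this
  rw [← h1, collapse_foldl]

-- ===== VERDICT (by name: the statement is the Claim_ definition above) =====
theorem solution_spec : Claim_equal_solution := by
  intro s _
  unfold Spec_solution solution solution_alt
  have hA := foldA_eq s.toList []
  simp only [List.length_nil, Nat.cast_zero, zero_sub] at hA
  rw [hA, collapse_eq_stack]
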